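-- pv_equiv track=rewrite | github.com/CBreazy/arc-agent-proj | arc_agent/engine.py | apply_patterns_to_test_grid
-- ===== SOURCE A (Python) =====
-- def apply_patterns_to_test_grid(grid, learned_patterns):
--     """
--     For each test row, apply a matching pattern from training if a known symbol is found.
--     """
--     height = len(grid)
--     width = len(grid[0])
--     output = [row.copy() for row in grid]
--
--     for y in range(height):
--         row = grid[y]
--         row_syms = [val for val in row if val != 0]
--         if not row_syms:
--             continue
--
--         matched = False
--         for (start_x, pattern, leading) in learned_patterns:
--             if any(symbol in row_syms for symbol in pattern):
--                 # Apply this pattern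
--                 new_row = [0] * width
--                 for x in range(start_x, width, len(pattern)):
--                     for i, val in enumerate(pattern):
--                         if x + i < width:
--                             new_row[x + i] = val
--                 output[y] = new_row
--                 matched = True
--                 break
--
--         if not matched:
--             # Default to original row if no pattern matched
--             output[y] = row.copy()
--
--     return output
-- ===== SOURCE B (Python) =====
-- def apply_patterns_to_test_grid(grid, learned_patterns):
--     """
--     For each test row, apply a matching pattern from training if a known symbol is found.
--     Rewrite: builds the output forward row by row; the matching pattern is found once
--     (set intersection), and the tiled row is produced in one closed-form pass with
--     modular indexing instead of nested tile-by-tile writes.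
--     """
--     width = len(grid[0])
--     out = []
--     for row in grid:
--         syms = {v for v in row if v != 0}
--         chosen = None
--         if syms:
--             for (start_x, pattern, _leading) in learned_patterns:
--                 if not syms.isdisjoint(pattern):
--                     chosen = (start_x, pattern)
--                     break
--         if chosen is None:
--             out.append(row.copy())
--         else:
--             start_x, pattern = chosen
--             L = len(pattern)
--             out.append([pattern[(j - start_x) % L] if j >= start_x else 0
--                         for j in range(width)])
--     return out
-- ===== Notes on version B (the rewrite author's own statement) =====
-- stated objective: simpler
-- what changed: The nested tile-by-tile mutation of a preallocated output (two inner loops writing new_row cell by cell, plus a matched flag and a default re-copy) is replaced by a forward construction that appends one row at a time, picks the first matching pattern via set intersection, and fills a tiled row in a single closed-form comprehension with modular indexing pattern[(j-start_x) % L].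
import Mathlib
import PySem

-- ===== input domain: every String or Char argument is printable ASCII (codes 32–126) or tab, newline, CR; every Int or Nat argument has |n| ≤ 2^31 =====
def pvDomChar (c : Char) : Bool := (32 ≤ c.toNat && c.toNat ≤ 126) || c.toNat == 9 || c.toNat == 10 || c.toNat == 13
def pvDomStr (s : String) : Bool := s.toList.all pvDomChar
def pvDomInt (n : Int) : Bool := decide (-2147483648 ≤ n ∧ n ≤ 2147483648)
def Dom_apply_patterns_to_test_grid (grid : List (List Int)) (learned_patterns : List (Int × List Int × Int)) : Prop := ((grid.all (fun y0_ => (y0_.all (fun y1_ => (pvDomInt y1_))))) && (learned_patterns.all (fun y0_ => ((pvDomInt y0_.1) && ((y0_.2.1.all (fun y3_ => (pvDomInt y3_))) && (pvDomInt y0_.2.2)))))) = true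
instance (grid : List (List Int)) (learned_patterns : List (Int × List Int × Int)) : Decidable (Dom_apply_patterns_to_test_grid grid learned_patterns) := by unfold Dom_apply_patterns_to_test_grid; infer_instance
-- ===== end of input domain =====

-- B rebuilds the output forward with the first matching pattern found by set intersection and
-- each tiled row produced by one closed-form modular-indexing pass (objective: simpler).

-- ===== PORT A =====
-- 'if x + i < width: new_row[x + i] = val' (negative indices wrap, as in Python list assignment)
def pvA_writeOne (width x : Int) (new_row : List Int) (iv : Int × Int) : List Int :=
  if x + iv.1 < width then PySem.List.pySetD new_row (x + iv.1) iv.2 else new_row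

-- 'for i, val in enumerate(pattern): …'
def pvA_tile (width : Int) (pattern : List Int) (new_row : List Int) (x : Int) : List Int :=
  (PySem.List.enumerate pattern).foldl (pvA_writeOne width x) new_row

-- 'new_row = [0]*width; for x in range(start_x, width, len(pattern)): …'
def pvA_newRow (width start_x : Int) (pattern : List Int) : List Int :=
  (PySem.List.pyRange start_x width pattern.length).foldl (pvA_tile width pattern)
    (List.replicate width.toNat 0)

-- one step of 'for (start_x, pattern, leading) in learned_patterns: … break' (flag = matched)
def pvA_tryPat (width y : Int) (row_syms : List Int) (st : List (List Int) × Bool)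
    (pat : Int × List Int × Int) : List (List Int) × Bool :=
  if st.2 then st
  else if pat.2.1.any (fun symbol => row_syms.contains symbol) then
    (PySem.List.pySetD st.1 y (pvA_newRow width pat.1 pat.2.1), true)
  else st

-- body of 'for y in range(height)'
def pvA_row (grid : List (List Int)) (learned_patterns : List (Int × List Int × Int))
    (width : Int) (output : List (List Int)) (y : Int) : List (List Int) :=
  let row := PySem.List.pyGetD grid y []
  let row_syms := row.filter (fun val => decide (val ≠ 0))
  if row_syms = [] then output
  else
    let st := learned_patterns.foldl (pvA_tryPat width y row_syms) (output, false)
    if st.2 then st.1 else PySem.List.pySetD st.1 y row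

def apply_patterns_to_test_grid (grid : List (List Int)) (learned_patterns : List (Int × List Int × Int)) : List (List Int) :=
  let height : Int := grid.length
  let width : Int := (PySem.List.pyGetD grid 0 []).length
  let output := grid.map (fun row => row)
  (PySem.List.pyRange 0 height 1).foldl (pvA_row grid learned_patterns width) output

-- ===== PORT B =====
-- first pattern whose symbols intersect syms ('break' = keep the first some)
def pvB_firstPat (learned_patterns : List (Int × List Int × Int)) (syms : PySem.Set Int) :
    Option (Int × List Int) :=
  learned_patterns.foldl (fun c pat =>
    match c with
    | some _ => c
    | none => if PySem.Set.isdisjoint syms pat.2.1 then none else some (pat.1, pat.2.1)) none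

-- body of 'for row in grid' — appends either a copy of the row or the closed-form tiled row
def pvB_row (learned_patterns : List (Int × List Int × Int)) (width : Int) (row : List Int) : List Int :=
  let syms : PySem.Set Int := PySem.Set.ofList (row.filter (fun v => decide (v ≠ 0)))
  let chosen : Option (Int × List Int) :=
    if syms = [] then none else pvB_firstPat learned_patterns syms
  match chosen with
  | none => row
  | some (start_x, pattern) =>
      (PySem.List.pyRange 0 width 1).map (fun j =>
        if start_x ≤ j then
          PySem.List.pyGetD pattern (PySem.Int.mod (j - start_x) (pattern.length : Int)) 0
        else 0)

def apply_patterns_to_test_grid_alt (grid : List (List Int)) (learned_patterns : List (Int × List Int × Int)) : List (List Int) :=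
  let width : Int := (PySem.List.pyGetD grid 0 []).length
  grid.foldl (fun out row => out ++ [pvB_row learned_patterns width row]) []

-- ===== PRECONDITION & SPEC =====
-- 'symbol in row_syms' for one pattern: some symbol of the pattern is a nonzero value of the row
def pvMatch (row : List Int) (pat : Int × List Int × Int) : Bool :=
  pat.2.1.any (fun s => decide (s ≠ 0) && row.contains s)

-- Pre_ excludes exactly the inputs on which A raises IndexError: the empty grid (grid[0]),
-- and inputs where the FIRST matching pattern of some nonzero row has start_x < -width, so the
-- wrap-around write new_row[start_x] falls below the start of the row; on every other input A
-- returns normally and is matched.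
def Pre_apply_patterns_to_test_grid (grid : List (List Int)) (learned_patterns : List (Int × List Int × Int)) : Prop :=
  grid ≠ [] ∧
    (grid.all (fun row =>
      ((learned_patterns.find? (fun pat => pvMatch row pat)).all
        (fun pat => decide (-(((PySem.List.pyGetD grid 0 []).length : Int)) ≤ pat.1))))) = true
instance (grid : List (List Int)) (learned_patterns : List (Int × List Int × Int)) : Decidable (Pre_apply_patterns_to_test_grid grid learned_patterns) := by unfold Pre_apply_patterns_to_test_grid; infer_instance

def pvWitness_apply_patterns_to_test_grid : List (List Int) × (List (Int × List Int × Int)) :=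
  ([[1, 0, 2], [0, 0, 0]], [(1, [2, 3], 1)])

def Spec_apply_patterns_to_test_grid (grid : List (List Int)) (learned_patterns : List (Int × List Int × Int)) (out : List (List Int)) : Prop := out = apply_patterns_to_test_grid_alt grid learned_patterns
instance (grid : List (List Int)) (learned_patterns : List (Int × List Int × Int)) (out : List (List Int)) : Decidable (Spec_apply_patterns_to_test_grid grid learned_patterns out) := by unfold Spec_apply_patterns_to_test_grid; infer_instance

-- ===== CLAIM (what is proved, stated in full; the proofs are below) =====
def Claim_equal_apply_patterns_to_test_grid : Prop := ∀ (grid : List (List Int)) (learned_patterns : List (Int × List Int × Int)), Dom_apply_patterns_to_test_grid grid learned_patterns → Pre_apply_patterns_to_test_grid grid learned_patterns → Spec_apply_patterns_to_test_grid grid learned_patterns (apply_patterns_to_test_grid grid learned_patterns)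


-- ===== LEMMAS AND PROOFS =====

-- setting index n in a map over range w rewrites one cell
theorem pv_set_map_range (w n : Nat) (g : Nat → Int) (v : Int) :
    ((List.range w).map g).set n v = (List.range w).map (fun (j : Nat) => if j = n then v else g j) := by
  apply List.ext_getElem
  · simp
  · intro i h1 h2
    simp only [List.getElem_set, List.getElem_map, List.getElem_range]
    split_ifs with h h' <;> first | rfl | omega

-- pySetD (Python list assignment, wrapping negative indices) on a map over range w
theorem pv_setD_map_range (w : Nat) (g : Nat → Int) (idx : Int) (v : Int) (hidx : idx < (w : Int)) :
    PySem.List.pySetD ((List.range w).map g) idx v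
      = (List.range w).map (fun (j : Nat) =>
          if (0 ≤ idx ∧ (j : Int) = idx) ∨ (idx < 0 ∧ (j : Int) = (w : Int) + idx) then v else g j) := by
  simp only [PySem.List.pySetD, PySem.List.pySet?, PySem.List.pyIdx?, List.length_map,
    List.length_range]
  by_cases h0 : 0 ≤ idx
  · have hlt : idx < (w : Int) := hidx
    simp only [h0, if_true, hlt, Option.map_some, Option.getD_some]
    rw [pv_set_map_range]
    apply List.map_congr_left
    intro j hj
    have hj' : j < w := List.mem_range.mp hj
    have hiff : (j = idx.toNat) ↔
        ((0 ≤ idx ∧ (j : Int) = idx) ∨ (idx < 0 ∧ (j : Int) = (w : Int) + idx)) := by omega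
    simp only [hiff]
    split_ifs with hA hB <;> first | rfl | tauto
  · by_cases h1 : -(w : Int) ≤ idx
    · simp only [h0, if_false, h1, if_true, Option.map_some, Option.getD_some]
      rw [pv_set_map_range]
      apply List.map_congr_left
      intro j hj
      have hj' : j < w := List.mem_range.mp hj
      have hiff : (j = w - (-idx).toNat) ↔
          ((0 ≤ idx ∧ (j : Int) = idx) ∨ (idx < 0 ∧ (j : Int) = (w : Int) + idx)) := by omega
      simp only [hiff]
      split_ifs with hA hB <;> first | rfl | tauto
    · simp only [h0, if_false, h1, Option.map_none, Option.getD_none]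
      apply List.map_congr_left
      intro j hj
      have hj' : j < w := List.mem_range.mp hj
      have hc : ¬((0 ≤ idx ∧ (j : Int) = idx) ∨ (idx < 0 ∧ (j : Int) = (w : Int) + idx)) := by
        omega
      split_ifs with hd <;> first | rfl | tauto

theorem pv_pyGetD_cons_pos (v : Int) (q : List Int) (i : Int) (d : Int) (hi : 0 < i) :
    PySem.List.pyGetD (v :: q) i d = PySem.List.pyGetD q (i - 1) d := by
  obtain ⟨n, rfl⟩ : ∃ n : Nat, i = (n : Int) + 1 := ⟨(i - 1).toNat, by omega⟩
  have h2 : ((n : Int) + 1) = ((n + 1 : Nat) : Int) := by push_cast; ring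
  have h3 : ((n : Int) + 1) - 1 = ((n : Nat) : Int) := by ring
  rw [h3, PySem.List.pyGetD_natCast, h2, PySem.List.pyGetD_natCast, List.getD_cons_succ]

-- closed form of one tile write pass (enumerate fold) on a map over range w
theorem pv_seg_eq (w : Nat) (q : List Int) (x c : Int) (g : Nat → Int) :
    (PySem.List.enumerate q c).foldl (pvA_writeOne (w : Int) x) ((List.range w).map g)
      = (List.range w).map (fun (j : Nat) =>
          if x + c ≤ (j : Int) ∧ (j : Int) < x + c + q.length then
            PySem.List.pyGetD q ((j : Int) - (x + c)) 0
          else if x + c ≤ (j : Int) - w ∧ (j : Int) - w < x + c + q.length then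
            PySem.List.pyGetD q ((j : Int) - w - (x + c)) 0
          else g j) := by
  induction q generalizing c g with
  | nil =>
      rw [PySem.List.enumerate_nil, List.foldl_nil]
      apply List.map_congr_left
      intro j hj
      have hj' : j < w := List.mem_range.mp hj
      rw [if_neg (by simp only [List.length_nil, Nat.cast_zero]; omega), if_neg (by simp only [List.length_nil, Nat.cast_zero]; omega)]
  | cons v q ih =>
      rw [PySem.List.enumerate_cons, List.foldl_cons]
      set g1 : Nat → Int := fun j =>
        if (x + c < (w : Int)) ∧
            ((0 ≤ x + c ∧ (j : Int) = x + c) ∨ (x + c < 0 ∧ (j : Int) = (w : Int) + (x + c)))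
          then v else g j with hg1
      have hstep : pvA_writeOne (w : Int) x ((List.range w).map g) (c, v)
          = (List.range w).map g1 := by
        unfold pvA_writeOne
        dsimp only
        by_cases hxc : x + c < (w : Int)
        · rw [if_pos hxc, pv_setD_map_range _ _ _ _ hxc]
          apply List.map_congr_left
          intro j hj
          simp only [hg1]
          split_ifs <;> tauto
        · rw [if_neg hxc]
          apply List.map_congr_left
          intro j hj
          simp only [hg1]
          rw [if_neg (fun h => hxc h.1)]
      rw [hstep, ih (c + 1) g1]
      apply List.map_congr_left
      intro j hj
      have hj' : j < w := List.mem_range.mp hj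
      simp only [List.length_cons]
      by_cases hd : x + (c + 1) ≤ (j : Int) ∧ (j : Int) < x + (c + 1) + q.length
      · rw [if_pos hd, if_pos (by push_cast; omega)]
        rw [pv_pyGetD_cons_pos _ _ _ _ (by omega)]
        congr 1
        ring
      · rw [if_neg hd]
        by_cases he : x + (c + 1) ≤ (j : Int) - w ∧ (j : Int) - w < x + (c + 1) + q.length
        · rw [if_pos he, if_neg (by push_cast; omega), if_pos (by push_cast; omega)]
          rw [pv_pyGetD_cons_pos _ _ _ _ (by omega)]
          congr 1
          ring
        · rw [if_neg he]
          simp only [hg1]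
          by_cases hf : (x + c < (w : Int)) ∧
              ((0 ≤ x + c ∧ (j : Int) = x + c) ∨ (x + c < 0 ∧ (j : Int) = (w : Int) + (x + c)))
          · rw [if_pos hf]
            rcases hf with ⟨hw, ⟨hge, hjeq⟩ | ⟨hneg, hjeq⟩⟩
            · rw [if_pos (by push_cast; omega), show (j : Int) - (x + c) = 0 by omega]
              rw [PySem.List.pyGetD_zero_cons]
            · rw [if_neg (by push_cast; omega), if_pos (by push_cast; omega)]
              rw [show (j : Int) - w - (x + c) = 0 by omega]
              rw [PySem.List.pyGetD_zero_cons]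
          · rw [if_neg hf, if_neg (by push_cast; omega), if_neg (by push_cast; omega)]

-- value of cell j after the tiles of pvA_newRow's outer loop have covered positions [sx, e)
def pvInv (w : Nat) (sx : Int) (p : List Int) (e : Int) (j : Nat) : Int :=
  if sx ≤ (j : Int) ∧ (j : Int) < e then
    PySem.List.pyGetD p (PySem.Int.mod ((j : Int) - sx) p.length) 0
  else if sx ≤ (j : Int) - w ∧ (j : Int) - w < e then
    PySem.List.pyGetD p (PySem.Int.mod ((j : Int) - w - sx) p.length) 0
  else 0

theorem pv_mod_eq (L : Nat) (hL : 0 < L) (r s : Int) (hdvd : (L : Int) ∣ s)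
    (h0 : 0 ≤ r - s) (h1 : r - s < L) : PySem.Int.mod r (L : Int) = r - s := by
  obtain ⟨c, rfl⟩ := hdvd
  rw [PySem.Int.mod_eq_emod_of_pos (by exact_mod_cast hL)]
  calc r % (L : Int) = ((r - (L : Int) * c) + (L : Int) * c) % (L : Int) := by ring_nf
    _ = (r - (L : Int) * c) % (L : Int) := Int.add_mul_emod_self_left ..
    _ = r - (L : Int) * c := Int.emod_eq_of_lt h0 h1

theorem pv_tiles_eq (w : Nat) (sx : Int) (p : List Int) (hp : p ≠ []) (k : Nat) :
    ((List.range k).map (fun (i : Nat) => sx + (p.length : Int) * i)).foldl (pvA_tile (w : Int) p)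
        ((List.range w).map (fun _ => 0))
      = (List.range w).map (pvInv w sx p (sx + (p.length : Int) * k)) := by
  have hL : 0 < p.length := List.length_pos_of_ne_nil hp
  induction k with
  | zero =>
      simp only [List.range_zero, List.map_nil, List.foldl_nil, Nat.cast_zero, mul_zero, add_zero]
      apply List.map_congr_left
      intro j hj
      unfold pvInv
      rw [if_neg (by omega), if_neg (by omega)]
  | succ k ih =>
      rw [List.range_succ, List.map_append, List.foldl_append]
      simp only [List.map_cons, List.map_nil, List.foldl_cons, List.foldl_nil]
      rw [ih]
      have hsx_t : sx ≤ sx + (p.length : Int) * k := by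
        have := mul_nonneg (Int.natCast_nonneg p.length) (Int.natCast_nonneg k)
        linarith
      have hdvd : (p.length : Int) ∣ (sx + (p.length : Int) * k) - sx := by
        simp only [add_sub_cancel_left]
        exact dvd_mul_right ((p.length : Int)) (k : Int)
      have hsucc : sx + (p.length : Int) * ((k + 1 : Nat) : Int)
          = (sx + (p.length : Int) * k) + (p.length : Int) := by push_cast; ring
      rw [hsucc]
      set t := sx + (p.length : Int) * (k : Int) with hT
      clear_value t
      clear hT ih
      unfold pvA_tile
      rw [pv_seg_eq w p t 0 (pvInv w sx p t)]
      apply List.map_congr_left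
      intro j hj
      have hj' : j < w := List.mem_range.mp hj
      simp only [add_zero]
      unfold pvInv
      by_cases hC1 : t ≤ (j : Int) ∧ (j : Int) < t + p.length
      · rw [if_pos hC1, if_pos (by omega)]
        rw [pv_mod_eq p.length hL ((j : Int) - sx) (t - sx) hdvd (by omega) (by omega)]
        congr 1
        ring
      · rw [if_neg hC1]
        by_cases hC2 : t ≤ (j : Int) - w ∧ (j : Int) - w < t + p.length
        · rw [if_pos hC2, if_neg (by omega), if_pos (by omega)]
          rw [pv_mod_eq p.length hL ((j : Int) - w - sx) (t - sx) hdvd (by omega) (by omega)]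
          congr 1
          ring
        · rw [if_neg hC2]
          by_cases hD : sx ≤ (j : Int) ∧ (j : Int) < t
          · rw [if_pos hD, if_pos (by omega)]
          · rw [if_neg hD]
            by_cases hW : sx ≤ (j : Int) - w ∧ (j : Int) - w < t
            · rw [if_pos hW, if_neg (by omega), if_pos (by omega)]
            · rw [if_neg hW, if_neg (by omega), if_neg (by omega)]

-- the tiled row equals B's closed-form modular row
theorem pv_newRow_eq (w : Nat) (sx : Int) (p : List Int) (hp : p ≠ []) :
    pvA_newRow (w : Int) sx p
      = (PySem.List.pyRange 0 (w : Int) 1).map (fun j =>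
          if sx ≤ j then PySem.List.pyGetD p (PySem.Int.mod (j - sx) (p.length : Int)) 0 else 0) := by
  unfold pvA_newRow
  have hL : 0 < p.length := List.length_pos_of_ne_nil hp
  have hLi : (0 : Int) < (p.length : Int) := by exact_mod_cast hL
  rw [PySem.List.pyRange_of_pos sx (w : Int) hLi]
  have hrep : (List.replicate ((w : Int)).toNat 0 : List Int)
      = (List.range w).map (fun _ => (0 : Int)) := by
    rw [Int.toNat_natCast]
    symm
    rw [List.eq_replicate_iff]
    constructor
    · simp
    · intro b hb
      simp only [List.mem_map] at hb
      obtain ⟨_, _, h⟩ := hb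
      exact h.symm
  rw [hrep]
  set N := (if sx < (w : Int) then (((w : Int) - sx + p.length - 1) / (p.length : Int)).toNat else 0)
    with hN
  rw [pv_tiles_eq w sx p hp N]
  rw [PySem.List.pyRange_zero_nat w, List.map_map]
  apply List.map_congr_left
  intro j hj
  have hj' : j < w := List.mem_range.mp hj
  have hcov : sx < (w : Int) → (w : Int) ≤ sx + (p.length : Int) * N := by
    intro hlt
    rw [hN, if_pos hlt]
    set D := ((w : Int) - sx + (p.length : Int) - 1) / (p.length : Int) with hD
    have hD0 : 0 ≤ D := by
      rw [hD]
      exact Int.ediv_nonneg (by omega) (by omega)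
    rw [Int.toNat_of_nonneg hD0]
    have hed := Int.emod_add_mul_ediv ((w : Int) - sx + (p.length : Int) - 1) ((p.length : Int))
    have hm0 := Int.emod_nonneg ((w : Int) - sx + (p.length : Int) - 1)
      (by omega : (p.length : Int) ≠ 0)
    have hm1 := Int.emod_lt_of_pos ((w : Int) - sx + (p.length : Int) - 1) hLi
    rw [← hD] at hed
    linarith
  simp only [Function.comp_apply]
  unfold pvInv
  by_cases hs : sx ≤ (j : Int)
  · have hjcov : (j : Int) < sx + (p.length : Int) * N := by
      have h1 : sx < (w : Int) := by omega
      have h2 := hcov h1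
      linarith [show ((j : Int)) < (w : Int) by omega]
    rw [if_pos ⟨hs, hjcov⟩, if_pos hs]
  · rw [if_neg (fun h => hs h.1), if_neg (by omega), if_neg hs]

-- first matching pattern, named
def pvFirst (syms : List Int) : List (Int × List Int × Int) → Option (Int × List Int)
  | [] => none
  | pat :: rest =>
      if pat.2.1.any (fun symbol => syms.contains symbol) then some (pat.1, pat.2.1)
      else pvFirst syms rest

-- per-row value of A
def pvF (learned_patterns : List (Int × List Int × Int)) (width : Int) (row : List Int) : List Int :=
  let row_syms := row.filter (fun val => decide (val ≠ 0))
  if row_syms = [] then row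
  else match pvFirst row_syms learned_patterns with
    | none => row
    | some (sx, p) => pvA_newRow width sx p

theorem pv_tryPat_fold (width y : Int) (syms : List Int) (lp : List (Int × List Int × Int))
    (out : List (List Int)) :
    lp.foldl (pvA_tryPat width y syms) (out, false)
      = match pvFirst syms lp with
        | none => (out, false)
        | some (sx, p) => (PySem.List.pySetD out y (pvA_newRow width sx p), true) := by
  have habs : ∀ (l : List (Int × List Int × Int)) (st : List (List Int) × Bool), st.2 = true →
      l.foldl (pvA_tryPat width y syms) st = st := by
    intro l
    induction l with
    | nil => intro st _; rfl
    | cons pat rest ih =>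
        intro st hst
        rw [List.foldl_cons, show pvA_tryPat width y syms st pat = st from by
          unfold pvA_tryPat; rw [if_pos hst]]
        exact ih st hst
  induction lp with
  | nil => rfl
  | cons pat rest ih =>
      rw [List.foldl_cons]
      by_cases hm : pat.2.1.any (fun symbol => syms.contains symbol) = true
      · rw [show pvA_tryPat width y syms (out, false) pat
            = (PySem.List.pySetD out y (pvA_newRow width pat.1 pat.2.1), true) from by
          unfold pvA_tryPat; simp only [Bool.false_eq_true, if_false]; rw [if_pos hm]]
        rw [habs rest _ rfl]
        rw [show pvFirst syms (pat :: rest) = some (pat.1, pat.2.1) from by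
          unfold pvFirst; rw [if_pos hm]]
      · rw [show pvA_tryPat width y syms (out, false) pat = (out, false) from by
          unfold pvA_tryPat; simp only [Bool.false_eq_true, if_false]; rw [if_neg hm]]
        rw [show pvFirst syms (pat :: rest) = pvFirst syms rest from by
          unfold pvFirst; rw [if_neg hm]; cases rest <;> rfl]
        exact ih

theorem pvB_firstPat_eq (lp : List (Int × List Int × Int)) (syms : List Int) :
    pvB_firstPat lp (PySem.Set.ofList syms) = pvFirst syms lp := by
  have hcond : ∀ pat : Int × List Int × Int,
      (PySem.Set.isdisjoint (PySem.Set.ofList syms) pat.2.1 = false)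
        ↔ pat.2.1.any (fun symbol => syms.contains symbol) = true := by
    intro pat
    rw [← Bool.not_eq_true, ← not_iff_not, not_not]
    rw [PySem.Set.isdisjoint_iff]
    simp only [List.any_eq_true, List.contains_iff_mem, PySem.Set.mem_ofList, not_exists, not_and]
    constructor
    · intro h x hx hmem
      exact h x hmem hx
    · intro h x hx hmem
      exact h x hmem hx
  have habs : ∀ (l : List (Int × List Int × Int)) (v : Int × List Int),
      l.foldl (fun c pat =>
        match c with
        | some _ => c
        | none => if PySem.Set.isdisjoint (PySem.Set.ofList syms) pat.2.1 then none
                  else some (pat.1, pat.2.1)) (some v) = some v := by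
    intro l
    induction l with
    | nil => intro v; rfl
    | cons pat rest ih => intro v; simpa using ih v
  unfold pvB_firstPat
  induction lp with
  | nil => rfl
  | cons pat rest ih =>
      simp only [List.foldl_cons]
      by_cases hm : pat.2.1.any (fun symbol => syms.contains symbol) = true
      · have hd : PySem.Set.isdisjoint (PySem.Set.ofList syms) pat.2.1 = false :=
          (hcond pat).mpr hm
        simp only [hd, Bool.false_eq_true, if_false]
        rw [habs rest _]
        unfold pvFirst
        rw [if_pos hm]
      · have hd : PySem.Set.isdisjoint (PySem.Set.ofList syms) pat.2.1 = true := by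
          by_contra hno
          have hf : PySem.Set.isdisjoint (PySem.Set.ofList syms) pat.2.1 = false :=
            Bool.eq_false_iff.mpr hno
          exact hm ((hcond pat).mp hf)
        simp only [hd, if_true]
        rw [ih]
        rw [show pvFirst syms (pat :: rest) = pvFirst syms rest from by
          unfold pvFirst; rw [if_neg hm]; cases rest <;> rfl]

theorem pv_ofList_eq_nil_iff (xs : List Int) : PySem.Set.ofList xs = [] ↔ xs = [] := by
  constructor
  · intro h
    cases xs with
    | nil => rfl
    | cons x rest =>
        exfalso
        have hne : ∀ (l : List Int) (s : PySem.Set Int), s ≠ [] → l.foldl PySem.Set.add s ≠ [] := by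
          intro l
          induction l with
          | nil => intro s hs; exact hs
          | cons y t ih =>
              intro s hs
              simp only [List.foldl_cons]
              apply ih
              unfold PySem.Set.add
              split_ifs
              · exact hs
              · simp
        have : PySem.Set.ofList (x :: rest) ≠ [] := by
          unfold PySem.Set.ofList
          simp only [List.foldl_cons]
          apply hne
          unfold PySem.Set.add PySem.Set.empty
          simp
        exact this h
  · intro h
    rw [h]
    rfl

-- A's outer loop builds grid.map (pvF …)
theorem pv_first_ne_nil (lp : List (Int × List Int × Int)) (syms : List Int) (sx : Int)
    (p : List Int) (h : pvFirst syms lp = some (sx, p)) : p ≠ [] := by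
  induction lp with
  | nil => exact absurd h (by unfold pvFirst; simp)
  | cons pat rest ih =>
      unfold pvFirst at h
      by_cases hm : pat.2.1.any (fun symbol => syms.contains symbol) = true
      · rw [if_pos hm] at h
        cases h
        intro hnil
        rw [hnil] at hm
        simp at hm
      · rw [if_neg hm] at h
        exact ih h

theorem pv_rowbody (grid : List (List Int)) (lp : List (Int × List Int × Int)) (width : Int)
    (out : List (List Int)) (y : Int) :
    pvA_row grid lp width out y
      = (if (PySem.List.pyGetD grid y []).filter (fun val => decide (val ≠ 0)) = [] then out
         else PySem.List.pySetD out y (pvF lp width (PySem.List.pyGetD grid y []))) := by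
  simp only [pvA_row, pvF]
  by_cases hemp : (PySem.List.pyGetD grid y []).filter (fun val => decide (val ≠ 0)) = []
  · rw [if_pos hemp, if_pos hemp]
  · rw [if_neg hemp, if_neg hemp]
    rw [pv_tryPat_fold width y ((PySem.List.pyGetD grid y []).filter (fun val => decide (val ≠ 0)))
      lp out]
    rcases hfm : pvFirst ((PySem.List.pyGetD grid y []).filter (fun val => decide (val ≠ 0))) lp
      with _ | ⟨sx, p⟩ <;> (rw [if_neg hemp]; rfl)

theorem pv_outer (grid : List (List Int)) (lp : List (Int × List Int × Int)) (width : Int)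
    (k : Nat) (hk : k ≤ grid.length) :
    (PySem.List.pyRange 0 (k : Int) 1).foldl (pvA_row grid lp width) grid
      = (grid.take k).map (pvF lp width) ++ grid.drop k := by
  induction k with
  | zero =>
      rw [Nat.cast_zero, PySem.List.pyRange_one_eq_nil (le_refl 0), List.foldl_nil]
      simp
  | succ k ih =>
      have hk' : k ≤ grid.length := by omega
      have hklen : k < grid.length := by omega
      have hc : ((k + 1 : Nat) : Int) = (k : Int) + 1 := by push_cast; ring
      rw [hc, PySem.List.pyRange_one_succ_right (by positivity), List.foldl_append,
        List.foldl_cons, List.foldl_nil, ih hk', pv_rowbody]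
      have hrow : PySem.List.pyGetD grid (k : Int) [] = grid[k] := by
        rw [PySem.List.pyGetD_natCast]
        exact List.getD_eq_getElem grid [] hklen
      rw [hrow]
      have htake : grid.take (k + 1) = grid.take k ++ [grid[k]] := by
        rw [List.take_add_one]
        simp [List.getElem?_eq_getElem hklen]
      have hdrop : grid.drop k = grid[k] :: grid.drop (k + 1) := List.drop_eq_getElem_cons hklen
      by_cases hemp : (grid[k]).filter (fun val => decide (val ≠ 0)) = []
      · rw [if_pos hemp]
        have hF : pvF lp width grid[k] = grid[k] := by
          unfold pvF
          rw [if_pos hemp]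
        rw [htake, List.map_append, hdrop, List.map_singleton, hF]
        simp
      · rw [if_neg hemp]
        rw [PySem.List.pySetD_natCast]
        have hlen : ((grid.take k).map (pvF lp width)).length = k := by
          simp [List.length_take, min_eq_left hk']
        rw [List.set_append, hlen, if_neg (by omega), Nat.sub_self, hdrop, List.set_cons_zero]
        rw [htake, List.map_append, List.map_singleton]
        simp

theorem pv_row_eq (lp : List (Int × List Int × Int)) (w : Nat) (row : List Int) :
    pvF lp (w : Int) row = pvB_row lp (w : Int) row := by
  unfold pvF pvB_row
  dsimp only
  by_cases hemp : row.filter (fun v => decide (v ≠ 0)) = []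
  · rw [if_pos hemp]
    rw [show PySem.Set.ofList (row.filter (fun v => decide (v ≠ 0))) = ([] : List Int) from by
      rw [hemp]; rfl]
    simp
  · rw [if_neg hemp]
    have hne : PySem.Set.ofList (row.filter (fun v => decide (v ≠ 0))) ≠ [] := fun h =>
      hemp ((pv_ofList_eq_nil_iff _).mp h)
    rw [if_neg hne, pvB_firstPat_eq lp (row.filter (fun v => decide (v ≠ 0)))]
    cases hfm : pvFirst (row.filter (fun v => decide (v ≠ 0))) lp with
    | none => simp
    | some v =>
        obtain ⟨sx, p⟩ := v
        simp only
        exact pv_newRow_eq w sx p (pv_first_ne_nil lp _ sx p hfm)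

-- ===== VERDICT (by name: the statement is the Claim_ definition above) =====
theorem apply_patterns_to_test_grid_spec : Claim_equal_apply_patterns_to_test_grid := by
  intro grid lp _hdom _hpre
  unfold Spec_apply_patterns_to_test_grid
  unfold apply_patterns_to_test_grid apply_patterns_to_test_grid_alt
  simp only [List.map_id']
  rw [pv_outer grid lp _ grid.length (le_refl _)]
  simp only [List.take_length, List.drop_length, List.append_nil]
  rw [PySem.List.foldl_append_singleton_eq_map
    (pvB_row lp (((PySem.List.pyGetD grid 0 []).length : Int))) grid []]
  rw [List.nil_append]
  apply List.map_congr_left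
  intro row _
  exact pv_row_eq lp (PySem.List.pyGetD grid 0 []).length row
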